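-- pv_equiv track=rewrite | github.com/a3xrfgb/A.T.H.E.N.A | scripts/gen_ti_locale.py | _parse_quoted
-- ===== SOURCE A (Python) =====
-- def _parse_quoted(first: str, lines: list[str], start_i: int) -> tuple[str, int]:
--     """Parse TS string starting with first (may be '"foo' or full '"foo"')."""
--     if not first.startswith('"'):
--         return "", start_i + 1
--     buf: list[str] = []
--     i = start_i
--     s = first[1:]  # after opening "
--     while True:
--         # find closing unescaped "
--         j = 0
--         while j < len(s):
--             if s[j] == "\\" and j + 1 < len(s):
--                 j += 2
--                 continue
--             if s[j] == '"':
--                 buf.append(s[:j])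
--                 return "".join(buf), i + 1
--             j += 1
--         buf.append(s)
--         i += 1
--         if i >= len(lines):
--             return "".join(buf), i
--         s = lines[i]
-- ===== SOURCE B (Python) =====
-- def _parse_quoted(first: str, lines: list[str], start_i: int) -> tuple[str, int]:
--     """Parse TS string starting with first (may be '"foo' or full '"foo"')."""
--     if not first.startswith('"'):
--         return "", start_i + 1
--     acc = ""
--     i = start_i + 1
--     s = first[1:]
--     while True:
--         k = _closing_quote(s)
--         if k is not None:
--             return acc + s[:k], i
--         acc += s
--         if i >= len(lines):
--             return acc, i
--         s = lines[i]
--         i += 1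
--
--
-- def _closing_quote(s):
--     """Index of the first unescaped '\"' in s, or None: a quote closes iff the
--     run of consecutive backslashes just before it has even length."""
--     start = 0
--     while True:
--         k = s.find('"', start)
--         if k == -1:
--             return None
--         if _bs_run(s, k) % 2 == 0:
--             return k
--         start = k + 1
--
--
-- def _bs_run(s, k):
--     r = 0
--     while k - 1 - r >= 0 and s[k - 1 - r] == "\\":
--         r += 1
--     return r
-- ===== Notes on version B (the rewrite author's own statement) =====
-- stated objective: alternative
-- what changed: The inner escape-aware character-by-character state machine (j += 2 on backslash pairs) is replaced by a scan that uses str.find to jump directly between quote candidates and accepts the first one preceded by an even-length backslash run, and the buffer-list + ''.join accumulation is replaced by direct string concatenation with the line index kept one ahead.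
import Mathlib
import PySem

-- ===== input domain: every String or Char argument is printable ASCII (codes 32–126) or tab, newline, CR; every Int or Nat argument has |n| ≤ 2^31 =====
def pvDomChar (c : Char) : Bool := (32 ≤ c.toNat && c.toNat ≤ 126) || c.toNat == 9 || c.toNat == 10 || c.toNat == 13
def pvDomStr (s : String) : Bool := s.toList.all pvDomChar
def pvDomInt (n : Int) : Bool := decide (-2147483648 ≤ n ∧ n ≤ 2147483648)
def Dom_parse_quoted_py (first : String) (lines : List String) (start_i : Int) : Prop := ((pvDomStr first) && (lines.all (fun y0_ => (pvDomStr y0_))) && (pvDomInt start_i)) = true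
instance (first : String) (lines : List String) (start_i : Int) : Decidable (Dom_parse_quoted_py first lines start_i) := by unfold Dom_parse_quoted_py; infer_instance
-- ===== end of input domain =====

-- B replaces A's index-jumping escape state machine by a find-based scan that jumps between
-- quote candidates and accepts the first one preceded by an even run of backslashes, and
-- accumulates the result string directly instead of a buffer list joined at the end (alternative).


-- ===== PORT A =====
-- inner `while j < len(s)` scan of A: skip "\\"+char pairs, stop at the first quote reached,
-- returning s[:j]; none = no closing quote on this line
def pvInnerA (s : List Char) (j : Nat) : Option (List Char) :=
  if h : j < s.length then
    if s[j] = '\\' ∧ j + 1 < s.length then pvInnerA s (j + 2)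
    else if s[j] = '"' then some (s.take j)
    else pvInnerA s (j + 1)
  else none
  termination_by s.length - j

-- outer `while True` loop of A, state (buf, i, s); "".join(buf) = PySem.Chars.join []
def pvLoopA (lines : List String) (buf : List (List Char)) (i : Int) (s : List Char) :
    List Char × Int :=
  match pvInnerA s 0 with
  | some pre => (PySem.Chars.join [] (buf ++ [pre]), i + 1)
  | none =>
    let buf' := buf ++ [s]
    if (lines.length : Int) ≤ i + 1 then (PySem.Chars.join [] buf', i + 1)
    else
      match PySem.List.pyGet? lines (i + 1) with
      | some t => pvLoopA lines buf' (i + 1) t.toList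
      | none => (PySem.Chars.join [] buf', i + 1)  -- Python raises IndexError here: outside Pre_
  termination_by ((lines.length : Int) - i).toNat
  decreasing_by simp only [not_le] at *; omega

def parse_quoted_py (first : String) (lines : List String) (start_i : Int) : String × Int :=
  if ¬ (PySem.Str.startswith first "\"" = true) then ("", start_i + 1)
  else
    let r := pvLoopA lines [] start_i (PySem.List.slice first.toList (some 1) none)
    (String.ofList r.1, r.2)

-- ===== PORT B =====
-- _bs_run(s, k): r = 0; while k-1-r >= 0 and s[k-1-r] == '\\': r += 1
def pvBsRunAux (s : List Char) (k r : Nat) : Nat :=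
  if r < k ∧ s[k - 1 - r]? = some '\\' then pvBsRunAux s k (r + 1) else r
  termination_by k - r
  decreasing_by omega

def pvBsRun (s : List Char) (k : Nat) : Nat := pvBsRunAux s k 0

-- needed by pvCloseGo's termination proof: s.find('"', start) past the end is -1
theorem pvFindFrom_of_gt (s : List Char) (start : Nat) (h : s.length < start) :
    PySem.Chars.findFrom s ['"'] (start : Int) none = -1 := by
  simp only [PySem.Chars.findFrom]
  have h0 : ¬ ((start : Int) < 0) := by omega
  have h1 : ((s.length : Int) < (start : Int)) := by exact_mod_cast h
  simp [h0, h1]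

-- `while` of _closing_quote: k = s.find('"', start); accept k iff _bs_run(s, k) is even
def pvCloseGo (s : List Char) (start : Nat) : Option Nat :=
  let k := PySem.Chars.findFrom s ['"'] (start : Int) none
  if hk : k = -1 then none
  else if pvBsRun s k.toNat % 2 = 0 then some k.toNat
  else pvCloseGo s (k.toNat + 1)
  termination_by s.length - start
  decreasing_by
    have hle : start ≤ s.length := by
      by_contra hgt
      exact hk (pvFindFrom_of_gt s start (by omega))
    have := PySem.Chars.findFrom_natCast_spec s ['"'] start hle hk
    have hlen : (PySem.Chars.findFrom s ['"'] (start : Int) none).toNat < s.length := by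
      have hpre := this.2.1
      have := hpre.length_le
      simp at this
      omega
    omega

def pvClosing (s : List Char) : Option Nat := pvCloseGo s 0

-- outer loop of B, state (acc, i, s); i is already the index AFTER the line being scanned
def pvLoopB (lines : List String) (acc : List Char) (i : Int) (s : List Char) :
    List Char × Int :=
  match pvClosing s with
  | some k => (acc ++ s.take k, i)
  | none =>
    let acc' := acc ++ s
    if (lines.length : Int) ≤ i then (acc', i)
    else
      match PySem.List.pyGet? lines i with
      | some t => pvLoopB lines acc' (i + 1) t.toList
      | none => (acc', i)  -- Python raises IndexError here: outside Pre_
  termination_by ((lines.length : Int) - i).toNat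
  decreasing_by simp only [not_le] at *; omega

def parse_quoted_py_alt (first : String) (lines : List String) (start_i : Int) : String × Int :=
  if ¬ (PySem.Str.startswith first "\"" = true) then ("", start_i + 1)
  else
    let r := pvLoopB lines [] (start_i + 1) (PySem.List.slice first.toList (some 1) none)
    (String.ofList r.1, r.2)

-- ===== PRECONDITION & SPEC =====
-- spec-side parity of the backslash run ending just before index k (independent of both ports)
def pvRunEven (s : List Char) : Nat → Bool
  | 0 => true
  | k + 1 => if s[k]? = some '\\' then !(pvRunEven s k) else true

-- s has a closing (unescaped) quote
def pvHasClose (s : List Char) : Bool :=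
  (List.range s.length).any (fun j => s[j]! == '"' && pvRunEven s j)

-- Pre_ excludes exactly the inputs where Python A raises IndexError: first opens a quote that
-- no line closes inside `first`, and start_i + 1 < -len(lines), so lines[start_i+1] is out of range.
def Pre_parse_quoted_py (first : String) (lines : List String) (start_i : Int) : Prop :=
  ¬ (PySem.Str.startswith first "\"" = true ∧ pvHasClose (first.toList.drop 1) = false ∧
      start_i + 1 < -(lines.length : Int))
instance (first : String) (lines : List String) (start_i : Int) :
    Decidable (Pre_parse_quoted_py first lines start_i) := by
  unfold Pre_parse_quoted_py; infer_instance

def pvWitness_parse_quoted_py : String × List String × Int := ("\"ab\\\"c", ["d\"e", "x"], 0)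

def Spec_parse_quoted_py (first : String) (lines : List String) (start_i : Int) (out : String × Int) : Prop := out = parse_quoted_py_alt first lines start_i
instance (first : String) (lines : List String) (start_i : Int) (out : String × Int) : Decidable (Spec_parse_quoted_py first lines start_i out) := by unfold Spec_parse_quoted_py; infer_instance

-- ===== CLAIM (what is proved, stated in full; the proofs are below) =====
def Claim_equal_parse_quoted_py : Prop := ∀ (first : String) (lines : List String) (start_i : Int), Dom_parse_quoted_py first lines start_i → Pre_parse_quoted_py first lines start_i → Spec_parse_quoted_py first lines start_i (parse_quoted_py first lines start_i)

-- ===== LEMMAS AND PROOFS =====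

-- first index j ≥ start with an unescaped quote (reference value both inner scans compute)
def pvFc (s : List Char) (j : Nat) : Option Nat :=
  if h : j < s.length then
    if s[j] = '"' ∧ pvBsRun s j % 2 = 0 then some j else pvFc s (j + 1)
  else none
  termination_by s.length - j

theorem pvBsRunAux_shift (s : List Char) (k : Nat) :
    ∀ n r, k - r ≤ n → pvBsRunAux s (k + 1) (r + 1) = pvBsRunAux s k r + 1 := by
  intro n
  induction n with
  | zero =>
    intro r hr
    conv_lhs => rw [pvBsRunAux]
    conv_rhs => rw [pvBsRunAux]
    have hk : ¬ (r < k) := by omega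
    have hk1 : ¬ (r + 1 < k + 1) := by omega
    simp [hk, hk1]
  | succ m ih =>
    intro r hr
    conv_lhs => rw [pvBsRunAux]
    conv_rhs => rw [pvBsRunAux]
    rw [show k + 1 - 1 - (r + 1) = k - 1 - r by omega]
    by_cases hc : r < k ∧ s[k - 1 - r]? = some '\\'
    · rw [if_pos ⟨by omega, hc.2⟩, if_pos hc]
      exact ih (r + 1) (by omega)
    · rw [if_neg (fun h => hc ⟨by omega, h.2⟩), if_neg hc]

theorem pvBsRun_succ (s : List Char) (k : Nat) :
    pvBsRun s (k + 1) = if s[k]? = some '\\' then pvBsRun s k + 1 else 0 := by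
  rw [pvBsRun, pvBsRun]
  conv_lhs => rw [pvBsRunAux]
  rw [show k + 1 - 1 - 0 = k by omega]
  by_cases hs : s[k]? = some '\\'
  · rw [if_pos ⟨by omega, hs⟩, if_pos hs]
    exact pvBsRunAux_shift s k k 0 (by omega)
  · rw [if_neg (fun h => hs h.2), if_neg hs]

theorem pvBsRun_zero (s : List Char) : pvBsRun s 0 = 0 := by
  rw [pvBsRun, pvBsRunAux]; simp

-- A's inner scan visits only positions with an even backslash run, and stops at the first
-- unescaped quote
theorem pvInnerA_eq_fc (s : List Char) :
    ∀ n j, s.length - j ≤ n → pvBsRun s j % 2 = 0 →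
      pvInnerA s j = (pvFc s j).map (s.take ·) := by
  intro n
  induction n with
  | zero =>
    intro j hj _
    conv_lhs => rw [pvInnerA]
    conv_rhs => rw [pvFc]
    rw [dif_neg (by omega), dif_neg (by omega)]
    rfl
  | succ m ih =>
    intro j hj heven
    conv_lhs => rw [pvInnerA]
    conv_rhs => rw [pvFc]
    by_cases h : j < s.length
    · rw [dif_pos h, dif_pos h]
      have hget : s[j]? = some s[j] := List.getElem?_eq_getElem h
      by_cases hb : s[j] = '\\' ∧ j + 1 < s.length
      · rw [if_pos hb]
        have e1 : pvBsRun s (j + 1) = pvBsRun s j + 1 := by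
          rw [pvBsRun_succ, if_pos (by rw [hget, hb.1])]
        have heven2 : pvBsRun s (j + 2) % 2 = 0 := by
          rw [show j + 2 = (j + 1) + 1 by omega, pvBsRun_succ]
          split
          · omega
          · omega
        rw [ih (j + 2) (by omega) heven2]
        have hnq : ¬ (s[j] = '"' ∧ pvBsRun s j % 2 = 0) := by
          intro hc; rw [hb.1] at hc; exact absurd hc.1 (by decide)
        rw [if_neg hnq]
        conv_rhs => rw [pvFc]
        rw [dif_pos hb.2]
        have hget1 : s[j + 1]? = some s[j + 1] := List.getElem?_eq_getElem hb.2
        have hnq1 : ¬ (s[j + 1] = '"' ∧ pvBsRun s (j + 1) % 2 = 0) := by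
          intro hc; omega
        rw [if_neg hnq1]
      · rw [if_neg hb]
        by_cases hq : s[j] = '"'
        · rw [if_pos hq, if_pos ⟨hq, heven⟩]
          rfl
        · rw [if_neg hq, if_neg (fun hc => hq hc.1)]
          by_cases hbs : s[j] = '\\'
          · have hend : ¬ (j + 1 < s.length) := fun hlt => hb ⟨hbs, hlt⟩
            conv_lhs => rw [pvInnerA]
            conv_rhs => rw [pvFc]
            rw [dif_neg hend, dif_neg hend]
            rfl
          · have heven1 : pvBsRun s (j + 1) % 2 = 0 := by
              rw [pvBsRun_succ, if_neg (by rw [hget]; exact fun hc => hbs (by injection hc))]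
          
            exact ih (j + 1) (by omega) heven1
    · rw [dif_neg h, dif_neg h]
      rfl

theorem pvFc_skip (s : List Char) :
    ∀ n j k, k - j ≤ n → j ≤ k → k ≤ s.length →
      (∀ m, j ≤ m → m < k → s[m]? ≠ some '"') → pvFc s j = pvFc s k := by
  intro n
  induction n with
  | zero =>
    intro j k h1 h2 _ _
    rw [show j = k by omega]
  | succ m ih =>
    intro j k h1 h2 h3 h4
    by_cases hjk : j = k
    · rw [hjk]
    · have hjlt : j < s.length := by omega
      conv_lhs => rw [pvFc]
      rw [dif_pos hjlt]
      have hget : s[j]? = some s[j] := List.getElem?_eq_getElem hjlt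
      have hnq : ¬ (s[j] = '"' ∧ pvBsRun s j % 2 = 0) := by
        intro hc
        exact h4 j (by omega) (by omega) (by rw [hget, hc.1])
      rw [if_neg hnq]
      exact ih (j + 1) k (by omega) (by omega) h3 (fun m hm1 hm2 => h4 m (by omega) hm2)

theorem pvFc_none (s : List Char) :
    ∀ n j, s.length - j ≤ n → (∀ m, j ≤ m → m < s.length → s[m]? ≠ some '"') →
      pvFc s j = none := by
  intro n
  induction n with
  | zero =>
    intro j hj _
    rw [pvFc, dif_neg (by omega)]
  | succ m ih =>
    intro j hj h4
    conv_lhs => rw [pvFc]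
    by_cases h : j < s.length
    · rw [dif_pos h]
      have hget : s[j]? = some s[j] := List.getElem?_eq_getElem h
      have hnq : ¬ (s[j] = '"' ∧ pvBsRun s j % 2 = 0) := by
        intro hc
        exact h4 j (by omega) h (by rw [hget, hc.1])
      rw [if_neg hnq]
      exact ih (j + 1) (by omega) (fun mm hm1 hm2 => h4 mm (by omega) hm2)
    · rw [dif_neg h]

-- B's find-and-check loop computes the same first unescaped quote
theorem pvCloseGo_eq_fc (s : List Char) :
    ∀ n start, s.length - start ≤ n → pvCloseGo s start = pvFc s start := by
  intro n
  induction n with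
  | zero =>
    intro start h
    by_cases hle : start ≤ s.length
    · have hse : start = s.length := by omega
      rw [pvCloseGo]
      have hf : PySem.Chars.findFrom s ['"'] (start : Int) none = -1 := by
        rw [(PySem.Chars.findFrom_natCast_eq_neg_one_iff s ['"'] start hle)]
        rw [hse]
        simp
      rw [dif_pos hf, pvFc, dif_neg (by omega)]
    · rw [pvCloseGo, dif_pos (pvFindFrom_of_gt s start (by omega)), pvFc,
        dif_neg (by omega)]
  | succ m ih =>
    intro start hle'
    by_cases hle : start ≤ s.length
    · rw [pvCloseGo]
      by_cases hneg : PySem.Chars.findFrom s ['"'] (start : Int) none = -1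
      · rw [dif_pos hneg]
        rw [(PySem.Chars.findFrom_natCast_eq_neg_one_iff s ['"'] start hle),
          List.singleton_infix_iff] at hneg
        refine (pvFc_none s (s.length - start) start (by omega) ?_).symm
        intro mm h1 h2 hq
        exact hneg (by
          have : (s.drop start)[mm - start]? = s[mm]? := by
            rw [List.getElem?_drop, show start + (mm - start) = mm by omega]
          exact List.mem_of_getElem? (by rw [this, hq]))
      · rw [dif_neg hneg]
        obtain ⟨hge, hpre, hmin⟩ := PySem.Chars.findFrom_natCast_spec s ['"'] start hle hneg
        set r : Int := PySem.Chars.findFrom s ['"'] (start : Int) none with hrdef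
        obtain ⟨t, ht⟩ := hpre
        have hq : s[r.toNat]? = some '"' := by
          have h0 : (s.drop r.toNat)[0]? = s[r.toNat]? := by
            rw [List.getElem?_drop, Nat.add_zero]
          rw [← h0, ← ht]
          rfl
        have hrlt : r.toNat < s.length := by
          obtain ⟨hh, _⟩ := List.getElem?_eq_some_iff.mp hq
          exact hh
        have hstr : start ≤ r.toNat := by omega
        have hskip : pvFc s start = pvFc s r.toNat := by
          refine pvFc_skip s (r.toNat - start) start r.toNat (by omega) hstr (by omega) ?_
          intro mm h1 h2 hqq
          refine hmin mm h1 h2 ?_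
          refine ⟨s.drop (mm + 1), ?_⟩
          have hmm : s[mm]? = some s[mm] := by
            exact List.getElem?_eq_getElem (by omega)
          rw [hmm] at hqq
          have hc : s[mm] = '"' := by injection hqq
          rw [← hc]
          have hx := List.getElem_cons_drop (as := s) (i := mm) (show mm < s.length by omega)
          simp only [List.singleton_append]
          exact hx
        rw [hskip]
        conv_rhs => rw [pvFc]
        rw [dif_pos hrlt]
        have hgr : s[r.toNat] = '"' := by
          have := List.getElem?_eq_getElem hrlt
          rw [this] at hq; injection hq
        by_cases hp : pvBsRun s r.toNat % 2 = 0
        · rw [if_pos hp, if_pos ⟨hgr, hp⟩]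
        · rw [if_neg hp, if_neg (fun hc => hp hc.2)]
          exact ih (r.toNat + 1) (by omega)
    · rw [pvCloseGo, dif_pos (pvFindFrom_of_gt s start (by omega)), pvFc,
        dif_neg (by omega)]

theorem pvInner_eq_closing (s : List Char) :
    pvInnerA s 0 = (pvClosing s).map (s.take ·) := by
  rw [pvClosing, pvCloseGo_eq_fc s s.length 0 (by omega)]
  exact pvInnerA_eq_fc s s.length 0 (by omega) (by rw [pvBsRun_zero])

theorem pvJoin_append (l : List (List Char)) (x : List Char) :
    PySem.Chars.join [] (l ++ [x]) = PySem.Chars.join [] l ++ x := by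
  induction l with
  | nil => simp [PySem.Chars.join_singleton, PySem.Chars.join_nil]
  | cons a t ih =>
    cases t with
    | nil => rw [show ([a] ++ [x]) = [a, x] from rfl, PySem.Chars.join_cons_cons,
        PySem.Chars.join_singleton, PySem.Chars.join_singleton]; simp
    | cons b u =>
      rw [show ((a :: b :: u) ++ [x]) = a :: (b :: (u ++ [x])) from rfl,
        PySem.Chars.join_cons_cons, show (b :: (u ++ [x])) = ((b :: u) ++ [x]) from rfl, ih,
        PySem.Chars.join_cons_cons]
      simp

-- main loop correspondence: B's accumulator is "".join of A's buffer, B's index runs one ahead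
theorem pvLoop_eq (lines : List String) :
    ∀ n (i : Int) buf s, ((lines.length : Int) - i).toNat ≤ n →
      pvLoopA lines buf i s = pvLoopB lines (PySem.Chars.join [] buf) (i + 1) s := by
  intro n
  induction n with
  | zero =>
    intro i buf s hn
    have hlen : (lines.length : Int) ≤ i := by omega
    conv_lhs => rw [pvLoopA]
    conv_rhs => rw [pvLoopB]
    rw [pvInner_eq_closing s]
    cases hcl : pvClosing s with
    | some k => simp only [Option.map_some, pvJoin_append]
    | none =>
      simp only [Option.map_none]
      rw [if_pos (by omega : (lines.length : Int) ≤ i + 1),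
        if_pos (by omega : (lines.length : Int) ≤ i + 1), pvJoin_append]
  | succ m ih =>
    intro i buf s hn
    conv_lhs => rw [pvLoopA]
    conv_rhs => rw [pvLoopB]
    rw [pvInner_eq_closing s]
    cases hcl : pvClosing s with
    | some k => simp only [Option.map_some, pvJoin_append]
    | none =>
      simp only [Option.map_none]
      by_cases hlen : (lines.length : Int) ≤ i + 1
      · rw [if_pos hlen, if_pos hlen, pvJoin_append]
      · rw [if_neg hlen, if_neg hlen]
        cases hg : PySem.List.pyGet? lines (i + 1) with
        | some t =>
          rw [← pvJoin_append]
          show pvLoopA lines (buf ++ [s]) (i + 1) t.toList =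
            pvLoopB lines (PySem.Chars.join [] (buf ++ [s])) (i + 1 + 1) t.toList
          exact ih (i + 1) (buf ++ [s]) t.toList (by omega)
        | none => simp only [pvJoin_append]

theorem parse_quoted_py_spec : Claim_equal_parse_quoted_py := by
  intro first lines start_i _ _
  unfold Spec_parse_quoted_py parse_quoted_py parse_quoted_py_alt
  by_cases h : PySem.Str.startswith first "\"" = true
  · rw [if_neg (by simpa using h), if_neg (by simpa using h)]
    rw [pvLoop_eq lines (((lines.length : Int) - start_i).toNat) start_i []
      (PySem.List.slice first.toList (some 1) none) (by omega)]
    rfl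
  · rw [if_pos h, if_pos h]
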